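-- pv_equiv track=rewrite | github.com/je0ng3/Algorithm | 프로그래머스/2/86971. 전력망을 둘로 나누기/전력망을 둘로 나누기.py | check
-- ===== SOURCE A (Python) =====
-- from collections import deque
--
-- def check(n, wires):
--     m = [[] for _ in range(n+1)]
--     for (a, b) in wires:
--         m[a].append(b)
--         m[b].append(a)
--
--     stack = deque([1])
--     visited = set()
--     while stack:
--         cur = stack.popleft()
--         if cur in visited:
--             continue
--         visited.add(cur)
--         for nxt in m[cur]:
--             if nxt not in visited:
--                 stack.append(nxt)
--     node = n-len(visited)
--     node2 = n-node
--     return abs(node-node2)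
-- ===== SOURCE B (Python) =====
-- def check(n, wires):
--     # Queueless fixpoint saturation: a boolean reached-flag per node, swept over the raw
--     # wire list until a sweep changes nothing. No adjacency structure, no BFS queue.
--     seen = [False] * (n + 1)
--     seen[1] = True
--     changed = True
--     while changed:
--         changed = False
--         for a, b in wires:
--             if seen[a] and not seen[b]:
--                 seen[b] = True
--                 changed = True
--             elif seen[b] and not seen[a]:
--                 seen[a] = True
--                 changed = True
--     return abs(n - 2 * seen.count(True))
-- ===== Notes on version B (the rewrite author's own statement) =====
-- stated objective: alternative
-- what changed: Replaces A's adjacency-list construction plus BFS queue/visited-set with a queueless fixpoint saturation: a boolean reached-flag per node, repeatedly swept over the raw wire list until a sweep changes nothing.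
-- outside the precondition, e.g. on check(3, [(1, -1), (3, 2)]): A returns 5, B returns 3
import Mathlib
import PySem

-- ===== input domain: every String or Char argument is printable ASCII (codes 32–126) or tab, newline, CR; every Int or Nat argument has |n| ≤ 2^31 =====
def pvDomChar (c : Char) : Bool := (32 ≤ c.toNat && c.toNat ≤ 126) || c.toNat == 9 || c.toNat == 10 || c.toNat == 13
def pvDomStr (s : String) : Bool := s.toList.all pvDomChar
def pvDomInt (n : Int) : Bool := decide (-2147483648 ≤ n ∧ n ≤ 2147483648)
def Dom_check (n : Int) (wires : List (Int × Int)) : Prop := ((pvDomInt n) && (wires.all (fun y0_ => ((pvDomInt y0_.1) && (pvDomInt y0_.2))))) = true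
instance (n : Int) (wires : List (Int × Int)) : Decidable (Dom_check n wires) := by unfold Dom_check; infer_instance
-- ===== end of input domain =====

-- B replaces A's adjacency-list + BFS queue with a queueless fixpoint saturation over the raw
-- wire list (alternative algorithm, same results on the stated domain; not claimed faster).

-- ===== PORT A =====
-- m[i].append(x): Python list indexing (negative index counts from the end); an out-of-range
-- index is an IndexError in Python (excluded by Pre_); the port leaves m unchanged there.
def pvSetAt (m : List (List Int)) (j : Int) (x : Int) : List (List Int) :=
  if 0 ≤ j ∧ j < (m.length : Int) then m.set j.toNat ((m.getD j.toNat []) ++ [x]) else m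

def pvAppendAt (m : List (List Int)) (i x : Int) : List (List Int) :=
  pvSetAt m (if i < 0 then i + m.length else i) x

-- m = [[] for _ in range(n+1)]; for (a, b) in wires: m[a].append(b); m[b].append(a)
def pvBuildAdj (n : Int) (wires : List (Int × Int)) : List (List Int) :=
  wires.foldl (fun m p => pvAppendAt (pvAppendAt m p.1 p.2) p.2 p.1)
    (List.replicate (n + 1).toNat [])

-- the while-loop over the deque: pop left; skip visited; else mark and append unvisited neighbours
def pvBfs (m : List (List Int)) : Nat → List Int → PySem.Set Int → PySem.Set Int
  | 0, _, vis => vis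
  | _ + 1, [], vis => vis
  | fuel + 1, cur :: stack, vis =>
    if PySem.Set.contains vis cur then pvBfs m fuel stack vis
    else
      let vis' := PySem.Set.add vis cur
      let nbrs := (PySem.List.pyGet? m cur).getD []
      pvBfs m fuel (stack ++ nbrs.filter (fun y => !(PySem.Set.contains vis' y))) vis'

def check (n : Int) (wires : List (Int × Int)) : Int :=
  let m := pvBuildAdj n wires
  -- fuel: a proved upper bound on the number of loop iterations of the Python while-loop
  let fuel := (2 * wires.length + 2) * (2 * wires.length + 2)
  let visited := pvBfs m fuel [1] PySem.Set.empty
  let node : Int := n - (visited.length : Int)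
  let node2 : Int := n - node
  |node - node2|

-- ===== PORT B =====
-- seen[i] (Python list read: negative index counts from the end; out of range is an
-- IndexError, excluded by Pre_; the port reads False there)
def pvFlagGet (s : List Bool) (i : Int) : Bool :=
  (PySem.List.pyGet? s i).getD false

def pvFlagSetAt (s : List Bool) (j : Int) : List Bool :=
  if 0 ≤ j ∧ j < (s.length : Int) then s.set j.toNat true else s

-- seen[i] = True (same Python indexing; out of range excluded by Pre_, the port leaves s)
def pvFlagSet (s : List Bool) (i : Int) : List Bool :=
  pvFlagSetAt s (if i < 0 then i + s.length else i)

-- one edge inspection of a sweep: flag the partner of a reached endpoint, note the change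
def pvPassStep (st : List Bool × Bool) (p : Int × Int) : List Bool × Bool :=
  if pvFlagGet st.1 p.1 && !(pvFlagGet st.1 p.2) then (pvFlagSet st.1 p.2, true)
  else if pvFlagGet st.1 p.2 && !(pvFlagGet st.1 p.1) then (pvFlagSet st.1 p.1, true)
  else st

-- while changed: changed = False; one sweep over wires; repeat while a sweep changed a flag
def pvSatLoop (wires : List (Int × Int)) : Nat → List Bool → List Bool
  | 0, s => s
  | fuel + 1, s =>
    let st := wires.foldl pvPassStep (s, false)
    if st.2 then pvSatLoop wires fuel st.1 else st.1

def check_alt (n : Int) (wires : List (Int × Int)) : Int :=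
  let seen0 := pvFlagSet (List.replicate (n + 1).toNat false) 1
  -- fuel: a proved upper bound on the number of sweeps of the Python while-loop
  let seen := pvSatLoop wires ((n + 1).toNat + 1) seen0
  |n - 2 * (PySem.List.count seen true : Int)|

-- ===== PRECONDITION & SPEC =====
-- Pre_ restricts inputs to the problem's domain: n ≥ 1 and wire endpoints that are node labels
-- in [0, n].  Outside it A raises IndexError (n ≤ 0, or a label outside [-(n+1), n]), or — for
-- negative labels, which are invalid nodes — A's Python list indexing silently aliases label a
-- to n+1+a while its visited set still counts the raw label, a corner where neither A's nor
-- B's count is specified behaviour.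
def Pre_check (n : Int) (wires : List (Int × Int)) : Prop :=
  1 ≤ n ∧ ∀ p ∈ wires, 0 ≤ p.1 ∧ p.1 ≤ n ∧ 0 ≤ p.2 ∧ p.2 ≤ n
instance (n : Int) (wires : List (Int × Int)) : Decidable (Pre_check n wires) := by
  unfold Pre_check; infer_instance

def pvWitness_check : Int × (List (Int × Int)) := (4, [(1, 2), (2, 3)])

def Spec_check (n : Int) (wires : List (Int × Int)) (out : Int) : Prop := out = check_alt n wires
instance (n : Int) (wires : List (Int × Int)) (out : Int) : Decidable (Spec_check n wires out) := by
  unfold Spec_check; infer_instance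

-- ===== CLAIM (what is proved, stated in full; the proofs are below) =====
def Claim_equal_check : Prop := ∀ (n : Int) (wires : List (Int × Int)),
  Dom_check n wires → Pre_check n wires → Spec_check n wires (check n wires)

-- ===== LEMMAS AND PROOFS =====

-- the undirected edge relation of the wire list, and reachability from node 1
def pvE (wires : List (Int × Int)) (x y : Int) : Prop := (x, y) ∈ wires ∨ (y, x) ∈ wires
def pvReach (wires : List (Int × Int)) (x : Int) : Prop := Relation.ReflTransGen (pvE wires) 1 x

-- the candidate universe: node 1 and every wire endpoint, deduplicated
def pvU (wires : List (Int × Int)) : List Int :=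
  PySem.Set.ofList (1 :: wires.flatMap (fun p => [p.1, p.2]))

theorem pvSetAt_length (m : List (List Int)) (j x : Int) :
    (pvSetAt m j x).length = m.length := by
  unfold pvSetAt
  split <;> simp

theorem pvAppendAt_length (m : List (List Int)) (i x : Int) :
    (pvAppendAt m i x).length = m.length := by
  unfold pvAppendAt; exact pvSetAt_length ..

theorem pvAppendAt_getD (m : List (List Int)) (i x : Int) (hi : 0 ≤ i)
    (hlt : i < (m.length : Int)) (c : Nat) (hc : c < m.length) :
    (pvAppendAt m i x).getD c [] =
      if c = i.toNat then (m.getD c []) ++ [x] else m.getD c [] := by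
  unfold pvAppendAt pvSetAt
  have hneg : ¬ i < 0 := by omega
  simp only [hneg, if_false]
  rw [if_pos ⟨hi, hlt⟩]
  by_cases h : c = i.toNat
  · subst h
    rw [if_pos rfl, List.getD_eq_getElem?_getD, List.getElem?_set_self (by omega),
      List.getD_eq_getElem?_getD]
    simp
  · rw [if_neg h, List.getD_eq_getElem?_getD, List.getElem?_set_ne (by omega),
      List.getD_eq_getElem?_getD]

theorem pvSetAt_getD_len_le (m : List (List Int)) (j x : Int) (c : Nat) :
    ((pvSetAt m j x).getD c []).length ≤ (m.getD c []).length + 1 := by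
  unfold pvSetAt
  split
  · rename_i h
    by_cases hc : c = j.toNat
    · rw [hc, List.getD_eq_getElem?_getD, List.getElem?_set_self (by omega),
        List.getD_eq_getElem?_getD]
      simp
    · rw [List.getD_eq_getElem?_getD, List.getElem?_set_ne (by omega),
        ← List.getD_eq_getElem?_getD]
      omega
  · omega

theorem pvAppendAt_getD_len_le (m : List (List Int)) (i x : Int) (c : Nat) :
    ((pvAppendAt m i x).getD c []).length ≤ (m.getD c []).length + 1 := by
  unfold pvAppendAt; exact pvSetAt_getD_len_le ..

theorem pvAppendAt_mem (m : List (List Int)) (i x : Int) (hi : 0 ≤ i)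
    (hlt : i < (m.length : Int)) (c : Int) (hc0 : 0 ≤ c) (hcl : c < (m.length : Int)) (y : Int) :
    y ∈ (pvAppendAt m i x).getD c.toNat [] ↔ y ∈ m.getD c.toNat [] ∨ (c = i ∧ y = x) := by
  rw [pvAppendAt_getD m i x hi hlt c.toNat (by omega)]
  by_cases h : c.toNat = i.toNat
  · have hci : c = i := by omega
    simp [hci]
  · have hci : ¬ c = i := by omega
    simp [h, hci]

theorem pvAdjFold_length : ∀ (ws : List (Int × Int)) (m : List (List Int)),
    (ws.foldl (fun m p => pvAppendAt (pvAppendAt m p.1 p.2) p.2 p.1) m).length = m.length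
  | [], m => rfl
  | (a, b) :: ws, m => by
    rw [List.foldl_cons, pvAdjFold_length ws _, pvAppendAt_length, pvAppendAt_length]

theorem pvAdjFold_mem : ∀ (ws : List (Int × Int)) (m : List (List Int)) (c y : Int),
    0 ≤ c → c < (m.length : Int) →
    (∀ p ∈ ws, 0 ≤ p.1 ∧ p.1 < (m.length : Int) ∧ 0 ≤ p.2 ∧ p.2 < (m.length : Int)) →
    (y ∈ (ws.foldl (fun m p => pvAppendAt (pvAppendAt m p.1 p.2) p.2 p.1) m).getD c.toNat []
      ↔ y ∈ m.getD c.toNat [] ∨ pvE ws c y)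
  | [], m, c, y, hc0, hcl, hw => by simp [pvE]
  | (a, b) :: ws, m, c, y, hc0, hcl, hw => by
    obtain ⟨ha0, hal, hb0, hbl⟩ := hw (a, b) (by simp)
    have h1 : (pvAppendAt m a b).length = m.length := pvAppendAt_length ..
    have h2 : (pvAppendAt (pvAppendAt m a b) b a).length = m.length := by
      rw [pvAppendAt_length, h1]
    rw [List.foldl_cons,
      pvAdjFold_mem ws _ c y hc0 (by rw [h2]; exact hcl)
        (by rw [h2]; exact fun p hp => hw p (List.mem_cons_of_mem _ hp)),
      pvAppendAt_mem _ b a hb0 (by rw [h1]; exact hbl) c hc0 (by rw [h1]; exact hcl),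
      pvAppendAt_mem m a b ha0 hal c hc0 hcl]
    simp only [pvE, List.mem_cons, Prod.mk.injEq]
    tauto

theorem length_pvBuildAdj (n : Int) (wires : List (Int × Int)) :
    (pvBuildAdj n wires).length = (n + 1).toNat := by
  unfold pvBuildAdj
  rw [pvAdjFold_length, List.length_replicate]

theorem mem_pvBuildAdj (n : Int) (wires : List (Int × Int)) (hn : 1 ≤ n)
    (hw : ∀ p ∈ wires, 0 ≤ p.1 ∧ p.1 ≤ n ∧ 0 ≤ p.2 ∧ p.2 ≤ n)
    (c y : Int) (hc0 : 0 ≤ c) (hcl : c ≤ n) :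
    y ∈ (pvBuildAdj n wires).getD c.toNat [] ↔ pvE wires c y := by
  unfold pvBuildAdj
  have hlen : ((List.replicate (n + 1).toNat ([] : List Int)).length : Int) = n + 1 := by
    rw [List.length_replicate]; omega
  rw [pvAdjFold_mem wires _ c y hc0 (by omega)
    (fun p hp => by obtain ⟨h1, h2, h3, h4⟩ := hw p hp; refine ⟨h1, by omega, h3, by omega⟩)]
  simp

theorem pvAdjFold_getD_len : ∀ (ws : List (Int × Int)) (m : List (List Int)) (c : Nat),
    ((ws.foldl (fun m p => pvAppendAt (pvAppendAt m p.1 p.2) p.2 p.1) m).getD c []).length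
      ≤ (m.getD c []).length + 2 * ws.length
  | [], m, c => by simp
  | (a, b) :: ws, m, c => by
    rw [List.foldl_cons]
    have h1 := pvAdjFold_getD_len ws (pvAppendAt (pvAppendAt m a b) b a) c
    have h2 := pvAppendAt_getD_len_le (pvAppendAt m a b) b a c
    have h3 := pvAppendAt_getD_len_le m a b c
    simp only [List.length_cons]
    omega

theorem pvBuildAdj_getD_len (n : Int) (wires : List (Int × Int)) (c : Nat) :
    ((pvBuildAdj n wires).getD c []).length ≤ 2 * wires.length := by
  unfold pvBuildAdj
  have h := pvAdjFold_getD_len wires (List.replicate (n + 1).toNat []) c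
  have : (List.replicate (n + 1).toNat ([] : List Int)).getD c [] = [] := by
    rw [List.getD_eq_getElem?_getD, List.getElem?_replicate]
    split <;> rfl
  rw [this] at h
  simpa using h

-- nodes of the universe not yet visited, and the loop potential
def pvUn (wires : List (Int × Int)) (vis : List Int) : Nat :=
  ((pvU wires).filter (fun x => !(PySem.Set.contains vis x))).length

def pvPhi (wires : List (Int × Int)) (stack vis : List Int) : Nat :=
  stack.length + (2 * wires.length + 2) * pvUn wires vis

theorem filter_drop_one : ∀ {l : List Int}, l.Nodup → ∀ {a : Int}, a ∈ l →
    ∀ {p : Int → Bool}, p a = true →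
    (l.filter (fun x => p x && !(x == a))).length + 1 = (l.filter p).length := by
  intro l hnd a ha p hpa
  induction l with
  | nil => cases ha
  | cons b l ih =>
    rcases List.mem_cons.mp ha with rfl | ha'
    · have hb : a ∉ l := (List.nodup_cons.mp hnd).1
      have hf : l.filter (fun x => p x && !(x == a)) = l.filter p := by
        apply List.filter_congr
        intro x hx
        have : x ≠ a := fun h => hb (h ▸ hx)
        simp [this]
      simp [hpa, hf]
    · have hnd' := (List.nodup_cons.mp hnd).2
      have hih := ih hnd' ha'
      by_cases hpb : p b = true
      · have hba : b ≠ a := fun h => (List.nodup_cons.mp hnd).1 (h ▸ ha')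
        simp only [List.filter_cons, hpb]
        simp [hba]
        omega
      · simp only [Bool.not_eq_true] at hpb
        simp only [List.filter_cons, hpb, Bool.false_and]
        exact hih

theorem mem_pvU (wires : List (Int × Int)) (x : Int) :
    x ∈ pvU wires ↔ x = 1 ∨ ∃ p ∈ wires, p.1 = x ∨ p.2 = x := by
  unfold pvU
  rw [PySem.Set.mem_ofList]
  simp only [List.mem_cons, List.mem_flatMap]
  constructor
  · rintro (rfl | ⟨p, hp, h⟩)
    · exact Or.inl rfl
    · exact Or.inr ⟨p, hp, by tauto⟩
  · rintro (rfl | ⟨p, hp, h⟩)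
    · exact Or.inl rfl
    · exact Or.inr ⟨p, hp, by tauto⟩

theorem nodup_pvU (wires : List (Int × Int)) : (pvU wires).Nodup :=
  PySem.Set.nodup_ofList _

theorem length_flatMap_pairs : ∀ (ws : List (Int × Int)),
    (ws.flatMap (fun p => [p.1, p.2])).length = 2 * ws.length
  | [] => rfl
  | p :: ws => by
    simp only [List.flatMap_cons, List.length_append, List.length_cons, List.length_nil,
      length_flatMap_pairs ws]
    omega

theorem length_pvU (wires : List (Int × Int)) : (pvU wires).length ≤ 2 * wires.length + 1 := by
  have hsub : pvU wires ⊆ 1 :: wires.flatMap (fun p => [p.1, p.2]) := fun x hx =>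
    (PySem.Set.mem_ofList _ _).mp hx
  have h1 := (List.subperm_of_subset (nodup_pvU wires) hsub).length_le
  simp only [List.length_cons, length_flatMap_pairs] at h1
  omega

theorem pvUn_add (wires : List (Int × Int)) (vis : List Int) (cur : Int)
    (hcur : cur ∈ pvU wires) (hnv : cur ∉ vis) :
    pvUn wires (PySem.Set.add vis cur) + 1 = pvUn wires vis := by
  unfold pvUn
  have hpred : ∀ x ∈ pvU wires,
      (!(PySem.Set.contains (PySem.Set.add vis cur) x)) =
        ((!(PySem.Set.contains vis x)) && !(x == cur)) := by
    intro x hx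
    by_cases h1 : x ∈ vis <;> by_cases h2 : x = cur
    · exact absurd (h2 ▸ h1) hnv
    · have : x ∈ PySem.Set.add vis cur := (PySem.Set.mem_add _ _ _).mpr (Or.inl h1)
      simp_all
    · subst h2
      have : x ∈ PySem.Set.add vis x := (PySem.Set.mem_add _ _ _).mpr (Or.inr rfl)
      simp_all
    · have : x ∉ PySem.Set.add vis cur := fun hm => by
        rcases (PySem.Set.mem_add _ _ _).mp hm with h | h
        · exact h1 h
        · exact h2 h
      simp_all
  rw [List.filter_congr hpred]
  exact filter_drop_one (nodup_pvU wires) hcur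
    (by simpa using hnv)

-- every node reachable from 1 lies in any edge-closed set containing 1
theorem pvReach_mem_of_closed {wires : List (Int × Int)} {r : List Int}
    (hcl : ∀ c ∈ r, ∀ y, pvE wires c y → y ∈ r) (h1 : (1 : Int) ∈ r) :
    ∀ x, pvReach wires x → x ∈ r := by
  intro x hx
  induction hx with
  | refl => exact h1
  | tail _ hbc ih => exact hcl _ ih _ hbc

-- the BFS loop, run with enough fuel from an invariant-respecting state, returns a sound,
-- edge-closed, duplicate-free visited set containing node 1
theorem pvBfs_main (n : Int) (wires : List (Int × Int)) (hn : 1 ≤ n)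
    (hw : ∀ p ∈ wires, 0 ≤ p.1 ∧ p.1 ≤ n ∧ 0 ≤ p.2 ∧ p.2 ≤ n) :
    ∀ (fuel : Nat) (stack : List Int) (vis : PySem.Set Int),
    (∀ x ∈ vis, pvReach wires x) →
    (∀ x ∈ stack, pvReach wires x) →
    (∀ x ∈ stack, x ∈ pvU wires) →
    (∀ c ∈ vis, ∀ y, pvE wires c y → y ∈ vis ∨ y ∈ stack) →
    ((1 : Int) ∈ vis ∨ (1 : Int) ∈ stack) →
    vis.Nodup →
    pvPhi wires stack vis ≤ fuel →
    (∀ x ∈ pvBfs (pvBuildAdj n wires) fuel stack vis, pvReach wires x) ∧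
    (∀ c ∈ pvBfs (pvBuildAdj n wires) fuel stack vis, ∀ y, pvE wires c y →
      y ∈ pvBfs (pvBuildAdj n wires) fuel stack vis) ∧
    (1 : Int) ∈ pvBfs (pvBuildAdj n wires) fuel stack vis ∧
    (pvBfs (pvBuildAdj n wires) fuel stack vis).Nodup := by
  intro fuel
  induction fuel with
  | zero =>
    intro stack vis hvR hsR hsU hcl h1 hnd hphi
    have hst : stack = [] := by
      have : stack.length = 0 := by unfold pvPhi at hphi; omega
      exact List.eq_nil_of_length_eq_zero this
    subst hst
    simp only [pvBfs]
    refine ⟨hvR, fun c hc y hy => ?_, ?_, hnd⟩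
    · rcases hcl c hc y hy with h | h
      · exact h
      · cases h
    · rcases h1 with h | h
      · exact h
      · cases h
  | succ fuel ih =>
    intro stack vis hvR hsR hsU hcl h1 hnd hphi
    match stack with
    | [] =>
      simp only [pvBfs]
      refine ⟨hvR, fun c hc y hy => ?_, ?_, hnd⟩
      · rcases hcl c hc y hy with h | h
        · exact h
        · cases h
      · rcases h1 with h | h
        · exact h
        · cases h
    | cur :: stack =>
      by_cases hcv : cur ∈ vis
      · -- cur already visited: skip it
        have hcb : PySem.Set.contains vis cur = true := (PySem.Set.contains_iff _ _).mpr hcv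
        simp only [pvBfs, hcb, if_true]
        refine ih stack vis hvR (fun x hx => hsR x (List.mem_cons_of_mem _ hx))
          (fun x hx => hsU x (List.mem_cons_of_mem _ hx)) ?_ ?_ hnd ?_
        · intro c hc y hy
          rcases hcl c hc y hy with h | h
          · exact Or.inl h
          · rcases List.mem_cons.mp h with rfl | h
            · exact Or.inl hcv
            · exact Or.inr h
        · rcases h1 with h | h
          · exact Or.inl h
          · rcases List.mem_cons.mp h with rfl | h
            · exact Or.inl hcv
            · exact Or.inr h
        · unfold pvPhi at hphi ⊢
          simp only [List.length_cons] at hphi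
          omega
      · -- fresh node: visit it and push its unvisited neighbours
        have hcb : PySem.Set.contains vis cur = false := by
          rw [← Bool.not_eq_true]
          intro h
          exact hcv ((PySem.Set.contains_iff _ _).mp h)
        have hcurU : cur ∈ pvU wires := hsU cur List.mem_cons_self
        have hcur01 : 0 ≤ cur ∧ cur ≤ n := by
          rcases (mem_pvU wires cur).mp hcurU with rfl | ⟨p, hp, h⟩
          · omega
          · obtain ⟨h1', h2', h3', h4'⟩ := hw p hp
            rcases h with rfl | rfl <;> omega
        have hcurR : pvReach wires cur := hsR cur List.mem_cons_self
        -- the neighbour list is the adjacency row of cur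
        have hlenm : ((pvBuildAdj n wires).length : Int) = n + 1 := by
          rw [length_pvBuildAdj]; omega
        have hrow : (PySem.List.pyGet? (pvBuildAdj n wires) cur).getD [] =
            (pvBuildAdj n wires).getD cur.toNat [] := by
          rw [PySem.List.pyGet?_of_nonneg _ hcur01.1, List.getD_eq_getElem?_getD]
        have hmem : ∀ y, y ∈ (PySem.List.pyGet? (pvBuildAdj n wires) cur).getD [] ↔
            pvE wires cur y := by
          intro y
          rw [hrow]
          exact mem_pvBuildAdj n wires hn hw cur y hcur01.1 hcur01.2
        have hrowlen : ((PySem.List.pyGet? (pvBuildAdj n wires) cur).getD []).length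
            ≤ 2 * wires.length := by
          rw [hrow]; exact pvBuildAdj_getD_len n wires cur.toNat
        simp only [pvBfs, hcb, Bool.false_eq_true, if_false]
        set vis' := PySem.Set.add vis cur with hvis'
        set nbrs := (PySem.List.pyGet? (pvBuildAdj n wires) cur).getD [] with hnbrs
        set stack' := stack ++ nbrs.filter (fun y => !(PySem.Set.contains vis' y)) with hstack'
        have hmemv' : ∀ y, y ∈ vis' ↔ y ∈ vis ∨ y = cur := fun y => PySem.Set.mem_add _ _ _
        refine ih stack' vis' ?_ ?_ ?_ ?_ ?_ ?_ ?_
        · intro x hx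
          rcases (hmemv' x).mp hx with h | rfl
          · exact hvR x h
          · exact hcurR
        · intro x hx
          rcases List.mem_append.mp hx with h | h
          · exact hsR x (List.mem_cons_of_mem _ h)
          · have := (hmem x).mp (List.mem_of_mem_filter h)
            exact Relation.ReflTransGen.tail hcurR this
        · intro x hx
          rcases List.mem_append.mp hx with h | h
          · exact hsU x (List.mem_cons_of_mem _ h)
          · have hE := (hmem x).mp (List.mem_of_mem_filter h)
            rcases hE with hE | hE
            · exact (mem_pvU wires x).mpr (Or.inr ⟨(cur, x), hE, Or.inr rfl⟩)
            · exact (mem_pvU wires x).mpr (Or.inr ⟨(x, cur), hE, Or.inl rfl⟩)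
        · intro c hc y hy
          rcases (hmemv' c).mp hc with h | rfl
          · rcases hcl c h y hy with h' | h'
            · exact Or.inl ((hmemv' y).mpr (Or.inl h'))
            · rcases List.mem_cons.mp h' with rfl | h'
              · exact Or.inl ((hmemv' y).mpr (Or.inr rfl))
              · exact Or.inr (List.mem_append.mpr (Or.inl h'))
          · by_cases hyv : y ∈ vis'
            · exact Or.inl hyv
            · refine Or.inr (List.mem_append.mpr (Or.inr ?_))
              refine List.mem_filter.mpr ⟨(hmem y).mpr hy, ?_⟩
              simp only [Bool.not_eq_eq_eq_not, Bool.not_true]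
              rw [← Bool.not_eq_true]
              intro h
              exact hyv ((PySem.Set.contains_iff _ _).mp h)
        · rcases h1 with h | h
          · exact Or.inl ((hmemv' 1).mpr (Or.inl h))
          · rcases List.mem_cons.mp h with rfl | h
            · exact Or.inl ((hmemv' 1).mpr (Or.inr rfl))
            · exact Or.inr (List.mem_append.mpr (Or.inl h))
        · exact PySem.Set.nodup_add _ _ hnd
        · -- the potential dropped by at least one
          have hun := pvUn_add wires vis cur hcurU hcv
          have hflen : (nbrs.filter (fun y => !(PySem.Set.contains vis' y))).length
              ≤ 2 * wires.length := le_trans (List.length_filter_le _ _) hrowlen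
          unfold pvPhi at hphi ⊢
          rw [← hvis'] at hun
          have hexp : (2 * wires.length + 2) * pvUn wires vis =
              (2 * wires.length + 2) * pvUn wires vis' + (2 * wires.length + 2) := by
            rw [← hun]; ring
          simp only [hstack', List.length_append, List.length_cons] at hphi ⊢
          omega

-- flag-array primitives: length, read-after-write, monotone writes
theorem pvFlagSetAt_length (s : List Bool) (j : Int) : (pvFlagSetAt s j).length = s.length := by
  unfold pvFlagSetAt
  split <;> simp

theorem pvFlagSet_length (s : List Bool) (i : Int) : (pvFlagSet s i).length = s.length := by
  unfold pvFlagSet; exact pvFlagSetAt_length ..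

theorem pvFlagGet_eq (s : List Bool) (i : Int) (hi : 0 ≤ i) :
    pvFlagGet s i = s.getD i.toNat false := by
  unfold pvFlagGet
  rw [PySem.List.pyGet?_of_nonneg _ hi, List.getD_eq_getElem?_getD]

theorem pvFlagSetAt_getD (s : List Bool) (j : Int) (hj : 0 ≤ j) (hlt : j < (s.length : Int))
    (k : Nat) (hk : k < s.length) :
    (pvFlagSetAt s j).getD k false = if k = j.toNat then true else s.getD k false := by
  unfold pvFlagSetAt
  rw [if_pos ⟨hj, hlt⟩]
  by_cases h : k = j.toNat
  · rw [if_pos h, h, List.getD_eq_getElem?_getD, List.getElem?_set_self (by omega)]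
    simp
  · rw [if_neg h, List.getD_eq_getElem?_getD, List.getElem?_set_ne (by omega),
      ← List.getD_eq_getElem?_getD]

theorem pvFlagSet_getD (s : List Bool) (i : Int) (hi : 0 ≤ i) (hlt : i < (s.length : Int))
    (k : Nat) (hk : k < s.length) :
    (pvFlagSet s i).getD k false = if k = i.toNat then true else s.getD k false := by
  unfold pvFlagSet
  have hneg : ¬ i < 0 := by omega
  simp only [hneg, if_false]
  exact pvFlagSetAt_getD s i hi hlt k hk

theorem pvFlagSetAt_getD_mono (s : List Bool) (j : Int) (k : Nat)
    (h : s.getD k false = true) : (pvFlagSetAt s j).getD k false = true := by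
  unfold pvFlagSetAt
  split
  · rename_i hcond
    by_cases hk : k = j.toNat
    · rw [hk, List.getD_eq_getElem?_getD, List.getElem?_set_self (by omega)]
      simp
    · rw [List.getD_eq_getElem?_getD, List.getElem?_set_ne (by omega),
        ← List.getD_eq_getElem?_getD]
      exact h
  · exact h

theorem pvFlagSet_getD_mono (s : List Bool) (i : Int) (k : Nat)
    (h : s.getD k false = true) : (pvFlagSet s i).getD k false = true := by
  unfold pvFlagSet; exact pvFlagSetAt_getD_mono s _ k h

theorem count_set_true : ∀ (s : List Bool) (j : Nat), j < s.length →
    s.getD j false = false → (s.set j true).count true = s.count true + 1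
  | [], j, hj, _ => by cases hj
  | b :: t, 0, _, h => by
    rw [List.getD_cons_zero] at h
    subst h
    simp
  | b :: t, j + 1, hj, h => by
    rw [List.getD_cons_succ] at h
    simp only [List.set_cons_succ, List.count_cons]
    rw [count_set_true t j (by simpa using hj) h]
    omega

theorem count_set_true_ge : ∀ (s : List Bool) (j : Nat),
    s.count true ≤ (s.set j true).count true
  | [], _ => le_refl _
  | b :: t, 0 => by
    simp only [List.set_cons_zero, List.count_cons]
    cases b <;> simp
  | b :: t, j + 1 => by
    simp only [List.set_cons_succ, List.count_cons]
    have := count_set_true_ge t j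
    omega

theorem pvFlagSetAt_count_ge (s : List Bool) (j : Int) :
    s.count true ≤ (pvFlagSetAt s j).count true := by
  unfold pvFlagSetAt
  split
  · exact count_set_true_ge ..
  · exact le_refl _

theorem pvFlagSet_count_ge (s : List Bool) (i : Int) :
    s.count true ≤ (pvFlagSet s i).count true := by
  unfold pvFlagSet; exact pvFlagSetAt_count_ge ..

-- one sweep of B: flags only grow, length is kept, the change flag is monotone,
-- and the number of set flags does not drop
theorem pvPass_facts : ∀ (ws : List (Int × Int)) (s : List Bool) (ch : Bool),
    (ws.foldl pvPassStep (s, ch)).1.length = s.length ∧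
    (∀ k : Nat, s.getD k false = true → (ws.foldl pvPassStep (s, ch)).1.getD k false = true) ∧
    (ch = true → (ws.foldl pvPassStep (s, ch)).2 = true) ∧
    s.count true ≤ (ws.foldl pvPassStep (s, ch)).1.count true
  | [], s, ch => ⟨rfl, fun _ h => h, fun h => h, le_refl _⟩
  | p :: ws, s, ch => by
    rw [List.foldl_cons]
    by_cases h1 : (pvFlagGet s p.1 && !(pvFlagGet s p.2)) = true
    · have hstep : pvPassStep (s, ch) p = (pvFlagSet s p.2, true) := by
        unfold pvPassStep; rw [if_pos h1]
      rw [hstep]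
      have ih := pvPass_facts ws (pvFlagSet s p.2) true
      exact ⟨by rw [ih.1, pvFlagSet_length],
        fun k h => ih.2.1 k (pvFlagSet_getD_mono s p.2 k h),
        fun _ => ih.2.2.1 rfl,
        le_trans (pvFlagSet_count_ge s p.2) ih.2.2.2⟩
    · by_cases h2 : (pvFlagGet s p.2 && !(pvFlagGet s p.1)) = true
      · have hstep : pvPassStep (s, ch) p = (pvFlagSet s p.1, true) := by
          unfold pvPassStep; rw [if_neg h1, if_pos h2]
        rw [hstep]
        have ih := pvPass_facts ws (pvFlagSet s p.1) true
        exact ⟨by rw [ih.1, pvFlagSet_length],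
          fun k h => ih.2.1 k (pvFlagSet_getD_mono s p.1 k h),
          fun _ => ih.2.2.1 rfl,
          le_trans (pvFlagSet_count_ge s p.1) ih.2.2.2⟩
      · have hstep : pvPassStep (s, ch) p = (s, ch) := by
          unfold pvPassStep; rw [if_neg h1, if_neg h2]
        rw [hstep]
        exact pvPass_facts ws s ch

-- a sweep that reports no change changed nothing and witnesses edge-closure
theorem pvPass_stable : ∀ (ws : List (Int × Int)) (s : List Bool),
    (ws.foldl pvPassStep (s, false)).2 = false →
    (ws.foldl pvPassStep (s, false)).1 = s ∧
    ∀ p ∈ ws, (pvFlagGet s p.1 = true ↔ pvFlagGet s p.2 = true)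
  | [], s, h => ⟨rfl, by simp⟩
  | p :: ws, s, h => by
    rw [List.foldl_cons] at h ⊢
    by_cases h1 : (pvFlagGet s p.1 && !(pvFlagGet s p.2)) = true
    · have hstep : pvPassStep (s, false) p = (pvFlagSet s p.2, true) := by
        unfold pvPassStep; rw [if_pos h1]
      rw [hstep] at h
      exact absurd ((pvPass_facts ws _ true).2.2.1 rfl) (by rw [h]; simp)
    · by_cases h2 : (pvFlagGet s p.2 && !(pvFlagGet s p.1)) = true
      · have hstep : pvPassStep (s, false) p = (pvFlagSet s p.1, true) := by
          unfold pvPassStep; rw [if_neg h1, if_pos h2]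
        rw [hstep] at h
        exact absurd ((pvPass_facts ws _ true).2.2.1 rfl) (by rw [h]; simp)
      · have hstep : pvPassStep (s, false) p = (s, false) := by
          unfold pvPassStep; rw [if_neg h1, if_neg h2]
        rw [hstep] at h ⊢
        obtain ⟨hs, hcl⟩ := pvPass_stable ws s h
        refine ⟨hs, fun q hq => ?_⟩
        rcases List.mem_cons.mp hq with rfl | hq'
        · simp only [Bool.and_eq_true, Bool.not_eq_true'] at h1 h2
          constructor
          · intro hm
            by_contra hm2
            rw [Bool.not_eq_true] at hm2
            exact h1 ⟨hm, hm2⟩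
          · intro hm
            by_contra hm2
            rw [Bool.not_eq_true] at hm2
            exact h2 ⟨hm, hm2⟩
        · exact hcl q hq'

-- every flag set by a sweep marks a reachable node
theorem pvPass_sound (n : Int) (wires : List (Int × Int))
    (hw : ∀ p ∈ wires, 0 ≤ p.1 ∧ p.1 ≤ n ∧ 0 ≤ p.2 ∧ p.2 ≤ n) :
    ∀ (ws : List (Int × Int)), (∀ p ∈ ws, p ∈ wires) → ∀ (s : List Bool) (ch : Bool),
    s.length = (n + 1).toNat →
    (∀ k : Nat, s.getD k false = true → pvReach wires (k : Int)) →
    ∀ k : Nat, (ws.foldl pvPassStep (s, ch)).1.getD k false = true → pvReach wires (k : Int)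
  | [], _, s, ch, _, hs, k, hk => hs k hk
  | p :: ws, hsub, s, ch, hlen, hs, k, hk => by
    rw [List.foldl_cons] at hk
    have hp := hw p (hsub p List.mem_cons_self)
    have hslen : ((s.length : Int)) = n + 1 := by rw [hlen]; omega
    by_cases h1 : (pvFlagGet s p.1 && !(pvFlagGet s p.2)) = true
    · have hstep : pvPassStep (s, ch) p = (pvFlagSet s p.2, true) := by
        unfold pvPassStep; rw [if_pos h1]
      rw [hstep] at hk
      refine pvPass_sound n wires hw ws (fun q hq => hsub q (List.mem_cons_of_mem _ hq))
        _ _ (by rw [pvFlagSet_length]; exact hlen) ?_ k hk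
      intro j hj
      by_cases hji : j = p.2.toNat
      · subst hji
        simp only [Bool.and_eq_true] at h1
        rw [pvFlagGet_eq s p.1 hp.1] at h1
        have hr1 : pvReach wires p.1 := by
          have := hs p.1.toNat h1.1
          rwa [Int.toNat_of_nonneg hp.1] at this
        rw [Int.toNat_of_nonneg hp.2.2.1]
        exact Relation.ReflTransGen.tail hr1
          (Or.inl (by rw [← Prod.mk.eta (p := p)] at hsub; exact hsub p List.mem_cons_self))
      · have hsetlen : (pvFlagSet s p.2).length = s.length := pvFlagSet_length ..
        have hjlen : j < s.length := by
          by_contra hbig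
          rw [List.getD_eq_getElem?_getD, List.getElem?_eq_none (by omega)] at hj
          simp at hj
        rw [pvFlagSet_getD (s := s) (i := p.2) hp.2.2.1 (by omega) j hjlen, if_neg hji] at hj
        exact hs j hj
    · by_cases h2 : (pvFlagGet s p.2 && !(pvFlagGet s p.1)) = true
      · have hstep : pvPassStep (s, ch) p = (pvFlagSet s p.1, true) := by
          unfold pvPassStep; rw [if_neg h1, if_pos h2]
        rw [hstep] at hk
        refine pvPass_sound n wires hw ws (fun q hq => hsub q (List.mem_cons_of_mem _ hq))
          _ _ (by rw [pvFlagSet_length]; exact hlen) ?_ k hk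
        intro j hj
        by_cases hji : j = p.1.toNat
        · subst hji
          simp only [Bool.and_eq_true] at h2
          rw [pvFlagGet_eq s p.2 hp.2.2.1] at h2
          have hr2 : pvReach wires p.2 := by
            have := hs p.2.toNat h2.1
            rwa [Int.toNat_of_nonneg hp.2.2.1] at this
          rw [Int.toNat_of_nonneg hp.1]
          exact Relation.ReflTransGen.tail hr2
            (Or.inr (by rw [← Prod.mk.eta (p := p)] at hsub; exact hsub p List.mem_cons_self))
        · have hsetlen : (pvFlagSet s p.1).length = s.length := pvFlagSet_length ..
          have hjlen : j < s.length := by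
            by_contra hbig
            rw [List.getD_eq_getElem?_getD, List.getElem?_eq_none (by omega)] at hj
            simp at hj
          rw [pvFlagSet_getD (s := s) (i := p.1) hp.1 (by omega) j hjlen, if_neg hji] at hj
          exact hs j hj
      · have hstep : pvPassStep (s, ch) p = (s, ch) := by
          unfold pvPassStep; rw [if_neg h1, if_neg h2]
        rw [hstep] at hk
        exact pvPass_sound n wires hw ws (fun q hq => hsub q (List.mem_cons_of_mem _ hq))
          _ _ hlen hs k hk

-- a sweep that reports a change strictly increased the number of set flags
theorem pvPass_growth (n : Int) (wires : List (Int × Int))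
    (hw : ∀ p ∈ wires, 0 ≤ p.1 ∧ p.1 ≤ n ∧ 0 ≤ p.2 ∧ p.2 ≤ n) :
    ∀ (ws : List (Int × Int)), (∀ p ∈ ws, p ∈ wires) → ∀ (s : List Bool),
    s.length = (n + 1).toNat →
    (ws.foldl pvPassStep (s, false)).2 = true →
    s.count true < (ws.foldl pvPassStep (s, false)).1.count true
  | [], _, s, _, h => by cases h
  | p :: ws, hsub, s, hlen, h => by
    rw [List.foldl_cons] at h ⊢
    have hp := hw p (hsub p List.mem_cons_self)
    have hslen : ((s.length : Int)) = n + 1 := by rw [hlen]; omega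
    by_cases h1 : (pvFlagGet s p.1 && !(pvFlagGet s p.2)) = true
    · have hstep : pvPassStep (s, false) p = (pvFlagSet s p.2, true) := by
        unfold pvPassStep; rw [if_pos h1]
      rw [hstep]
      simp only [Bool.and_eq_true, Bool.not_eq_true'] at h1
      have hget : s.getD p.2.toNat false = false := by
        have := h1.2
        rwa [pvFlagGet_eq s p.2 hp.2.2.1] at this
      have hset : (pvFlagSet s p.2).count true = s.count true + 1 := by
        unfold pvFlagSet
        have hneg : ¬ p.2 < 0 := by omega
        simp only [hneg, if_false]
        unfold pvFlagSetAt
        rw [if_pos ⟨hp.2.2.1, by omega⟩]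
        exact count_set_true s p.2.toNat (by omega) hget
      have := (pvPass_facts ws (pvFlagSet s p.2) true).2.2.2
      omega
    · by_cases h2 : (pvFlagGet s p.2 && !(pvFlagGet s p.1)) = true
      · have hstep : pvPassStep (s, false) p = (pvFlagSet s p.1, true) := by
          unfold pvPassStep; rw [if_neg h1, if_pos h2]
        rw [hstep]
        simp only [Bool.and_eq_true, Bool.not_eq_true'] at h2
        have hget : s.getD p.1.toNat false = false := by
          have := h2.2
          rwa [pvFlagGet_eq s p.1 hp.1] at this
        have hset : (pvFlagSet s p.1).count true = s.count true + 1 := by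
          unfold pvFlagSet
          have hneg : ¬ p.1 < 0 := by omega
          simp only [hneg, if_false]
          unfold pvFlagSetAt
          rw [if_pos ⟨hp.1, by omega⟩]
          exact count_set_true s p.1.toNat (by omega) hget
        have := (pvPass_facts ws (pvFlagSet s p.1) true).2.2.2
        omega
      · have hstep : pvPassStep (s, false) p = (s, false) := by
          unfold pvPassStep; rw [if_neg h1, if_neg h2]
        rw [hstep] at h ⊢
        exact pvPass_growth n wires hw ws (fun q hq => hsub q (List.mem_cons_of_mem _ hq)) s hlen h

-- the saturation loop, run with enough fuel, keeps the array's length, marks node 1,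
-- marks only reachable nodes, and ends edge-closed
theorem pvSatLoop_main (n : Int) (wires : List (Int × Int))
    (hw : ∀ p ∈ wires, 0 ≤ p.1 ∧ p.1 ≤ n ∧ 0 ≤ p.2 ∧ p.2 ≤ n) :
    ∀ (fuel : Nat) (s : List Bool),
    s.length = (n + 1).toNat →
    s.getD 1 false = true →
    (∀ k : Nat, s.getD k false = true → pvReach wires (k : Int)) →
    (n + 1).toNat < fuel + s.count true →
    (pvSatLoop wires fuel s).length = (n + 1).toNat ∧
    (pvSatLoop wires fuel s).getD 1 false = true ∧
    (∀ k : Nat, (pvSatLoop wires fuel s).getD k false = true → pvReach wires (k : Int)) ∧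
    (∀ p ∈ wires, (pvFlagGet (pvSatLoop wires fuel s) p.1 = true ↔
      pvFlagGet (pvSatLoop wires fuel s) p.2 = true)) := by
  intro fuel
  induction fuel with
  | zero =>
    intro s hlen h1 hR hcnt
    have := List.count_le_length (a := true) (l := s)
    omega
  | succ fuel ih =>
    intro s hlen h1 hR hcnt
    simp only [pvSatLoop]
    by_cases hch : (wires.foldl pvPassStep (s, false)).2 = true
    · rw [if_pos hch]
      have hfacts := pvPass_facts wires s false
      refine ih _ (by rw [hfacts.1]; exact hlen) (hfacts.2.1 1 h1)
        (pvPass_sound n wires hw wires (fun q hq => hq) s false hlen hR) ?_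
      have := pvPass_growth n wires hw wires (fun q hq => hq) s hlen hch
      omega
    · rw [if_neg hch]
      rw [Bool.not_eq_true] at hch
      obtain ⟨hs, hcl⟩ := pvPass_stable wires s hch
      rw [hs]
      exact ⟨hlen, h1, hR, hcl⟩

theorem contains_false_of_not_mem {s : PySem.Set Int} {x : Int} (h : x ∉ s) :
    PySem.Set.contains s x = false := by
  rw [← Bool.not_eq_true]
  exact fun hc => h ((PySem.Set.contains_iff _ _).mp hc)

theorem pvUn_empty (wires : List (Int × Int)) :
    pvUn wires PySem.Set.empty = (pvU wires).length := by
  unfold pvUn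
  have h : ∀ x ∈ pvU wires, (!(PySem.Set.contains PySem.Set.empty x)) = (fun _ : Int => true) x :=
    fun x _ => by rw [contains_false_of_not_mem (s := PySem.Set.empty) (fun h => absurd h (List.not_mem_nil))]; rfl
  rw [List.filter_congr h, List.filter_true]

-- every node reachable from 1 is node 1 or a wire endpoint, hence lies in [0, n]
theorem pvReach_bounds (n : Int) (wires : List (Int × Int)) (hn : 1 ≤ n)
    (hw : ∀ p ∈ wires, 0 ≤ p.1 ∧ p.1 ≤ n ∧ 0 ≤ p.2 ∧ p.2 ≤ n) :
    ∀ x, pvReach wires x → 0 ≤ x ∧ x ≤ n := by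
  intro x hx
  induction hx with
  | refl => omega
  | tail _ hbc _ =>
    rcases hbc with h | h
    · have := hw _ h
      exact ⟨this.2.2.1, this.2.2.2⟩
    · have := hw _ h
      exact ⟨this.1, this.2.1⟩

-- the number of True flags is the number of indices holding True
theorem count_true_eq : ∀ (s : List Bool),
    s.count true = (List.range s.length).countP (fun k => s.getD k false)
  | [] => rfl
  | b :: t => by
    rw [List.count_cons, count_true_eq t, List.length_cons, List.range_succ_eq_map,
      List.countP_cons, List.countP_map]
    have h1 : ((fun k => (b :: t).getD k false) ∘ Nat.succ) = (fun k => t.getD k false) := by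
      funext k
      simp [Function.comp]
    rw [h1, List.getD_cons_zero]
    cases b <;> simp

theorem check_spec : Claim_equal_check := by
  unfold Claim_equal_check Spec_check
  intro n wires hdom hpre
  obtain ⟨hn, hw⟩ := hpre
  -- A's BFS visited set
  have hphi0 : pvPhi wires [1] PySem.Set.empty ≤ (2 * wires.length + 2) * (2 * wires.length + 2) := by
    unfold pvPhi
    rw [pvUn_empty]
    have hU := length_pvU wires
    have h1 : (2 * wires.length + 2) * (pvU wires).length ≤
        (2 * wires.length + 2) * (2 * wires.length + 1) := Nat.mul_le_mul_left _ hU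
    have h2 : (2 * wires.length + 2) * (2 * wires.length + 2) =
        (2 * wires.length + 2) * (2 * wires.length + 1) + (2 * wires.length + 2) := by ring
    simp only [List.length_cons, List.length_nil]
    omega
  obtain ⟨hAs, hAc, hA1, hAnd⟩ := pvBfs_main n wires hn hw
    ((2 * wires.length + 2) * (2 * wires.length + 2)) [1] PySem.Set.empty
    (fun x hx => absurd hx (List.not_mem_nil))
    (fun x hx => by rcases List.mem_cons.mp hx with rfl | h; exacts [Relation.ReflTransGen.refl, absurd h (List.not_mem_nil)])
    (fun x hx => by rcases List.mem_cons.mp hx with rfl | h; exacts [(mem_pvU wires 1).mpr (Or.inl rfl), absurd h (List.not_mem_nil)])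
    (fun c hc => absurd hc (List.not_mem_nil))
    (Or.inr List.mem_cons_self)
    List.nodup_nil
    hphi0
  -- B's saturated flag array
  have hreplen : (List.replicate (n + 1).toNat (false : Bool)).length = (n + 1).toNat :=
    List.length_replicate
  have hrepget : ∀ k : Nat, (List.replicate (n + 1).toNat (false : Bool)).getD k false = false := by
    intro k
    rw [List.getD_eq_getElem?_getD, List.getElem?_replicate]
    split <;> rfl
  have hs0len : (pvFlagSet (List.replicate (n + 1).toNat false) 1).length = (n + 1).toNat := by
    rw [pvFlagSet_length, hreplen]
  have hs0get : ∀ k : Nat, k < (n + 1).toNat →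
      (pvFlagSet (List.replicate (n + 1).toNat false) 1).getD k false =
        if k = 1 then true else false := by
    intro k hk
    rw [pvFlagSet_getD _ 1 (by omega) (by rw [hreplen]; omega) k (by rw [hreplen]; omega)]
    have : (1 : Int).toNat = 1 := rfl
    rw [this, hrepget]
  have hs0get1 : (pvFlagSet (List.replicate (n + 1).toNat false) 1).getD 1 false = true := by
    rw [hs0get 1 (by omega)]
    rfl
  obtain ⟨hBlen, hB1, hBR, hBcl⟩ := pvSatLoop_main n wires hw ((n + 1).toNat + 1)
    (pvFlagSet (List.replicate (n + 1).toNat false) 1) hs0len hs0get1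
    (fun k hk => by
      by_cases hklen : k < (n + 1).toNat
      · rw [hs0get k hklen] at hk
        by_cases h1 : k = 1
        · subst h1
          exact Relation.ReflTransGen.refl
        · rw [if_neg h1] at hk
          cases hk
      · rw [List.getD_eq_getElem?_getD, List.getElem?_eq_none (by omega)] at hk
        cases hk)
    (by omega)
  -- completeness of the flags: every reachable node is flagged
  have hBc : ∀ x, pvReach wires x →
      (pvSatLoop wires ((n + 1).toNat + 1)
        (pvFlagSet (List.replicate (n + 1).toNat false) 1)).getD x.toNat false = true := by
    intro x hx
    induction hx with
    | refl => exact hB1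
    | @tail b c hab hbc ihb =>
      have hbb := pvReach_bounds n wires hn hw b hab
      have hcb : 0 ≤ c ∧ c ≤ n := by
        rcases hbc with h | h
        · obtain ⟨h1, h2, h3, h4⟩ := hw _ h
          exact ⟨h3, h4⟩
        · obtain ⟨h1, h2, h3, h4⟩ := hw _ h
          exact ⟨h1, h2⟩
      rcases hbc with h | h
      · have := (hBcl (b, c) h)
        simp only [pvFlagGet_eq _ _ hbb.1, pvFlagGet_eq _ _ hcb.1] at this
        exact this.mp ihb
      · have := (hBcl (c, b) h)
        simp only [pvFlagGet_eq _ _ hcb.1, pvFlagGet_eq _ _ hbb.1] at this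
        exact this.mpr ihb
  -- the visited list (mapped to indices) and the flagged indices are the same set
  have hA0 : ∀ x ∈ pvBfs (pvBuildAdj n wires) ((2 * wires.length + 2) * (2 * wires.length + 2))
      [1] PySem.Set.empty, 0 ≤ x ∧ x ≤ n := fun x hx =>
    pvReach_bounds n wires hn hw x (hAs x hx)
  have hmapnd : ((pvBfs (pvBuildAdj n wires) ((2 * wires.length + 2) * (2 * wires.length + 2))
      [1] PySem.Set.empty).map Int.toNat).Nodup := by
    refine List.Nodup.map_on ?_ hAnd
    intro x hx y hy hxy
    have h1 := hA0 x hx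
    have h2 := hA0 y hy
    omega
  have hfnd : ((List.range (n + 1).toNat).filter
      (fun k => (pvSatLoop wires ((n + 1).toNat + 1)
        (pvFlagSet (List.replicate (n + 1).toNat false) 1)).getD k false)).Nodup :=
    List.Nodup.filter _ (List.nodup_range)
  have hmemiff : ∀ k : Nat,
      k ∈ (pvBfs (pvBuildAdj n wires) ((2 * wires.length + 2) * (2 * wires.length + 2))
        [1] PySem.Set.empty).map Int.toNat ↔
      k ∈ (List.range (n + 1).toNat).filter
        (fun j => (pvSatLoop wires ((n + 1).toNat + 1)
          (pvFlagSet (List.replicate (n + 1).toNat false) 1)).getD j false) := by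
    intro k
    constructor
    · intro hk
      obtain ⟨x, hxm, rfl⟩ := List.mem_map.mp hk
      have hb := hA0 x hxm
      refine List.mem_filter.mpr ⟨List.mem_range.mpr (by omega), ?_⟩
      have := hBc x (hAs x hxm)
      simpa using this
    · intro hk
      obtain ⟨hkr, hkf⟩ := List.mem_filter.mp hk
      have hreach : pvReach wires (k : Int) := hBR k (by simpa using hkf)
      refine List.mem_map.mpr ⟨(k : Int), pvReach_mem_of_closed hAc hA1 _ hreach, ?_⟩
      simp
  have hlen2 : (pvBfs (pvBuildAdj n wires) ((2 * wires.length + 2) * (2 * wires.length + 2))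
      [1] PySem.Set.empty).length =
      (pvSatLoop wires ((n + 1).toNat + 1)
        (pvFlagSet (List.replicate (n + 1).toNat false) 1)).count true := by
    have hp := ((List.perm_ext_iff_of_nodup hmapnd hfnd).mpr hmemiff).length_eq
    rw [List.length_map] at hp
    rw [count_true_eq, hBlen, List.countP_eq_length_filter]
    exact hp
  show check n wires = check_alt n wires
  unfold check check_alt
  simp only []
  rw [PySem.List.count_eq, hlen2]
  have harith : ∀ v : Int, (n - v) - (n - (n - v)) = n - 2 * v := fun v => by ring
  rw [harith]
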